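-- pv_equiv track=rewrite | github.com/mrbartrns/algorithm-and-structure | exaustive_search_boj/boj_1107_1.py | solve
-- ===== SOURCE A (Python) =====
-- def solve(n, btns):
--     res = abs(n - 100)
--     for i in range(1000001):
--         str_i = str(i)
--         flag = True
--         for j in range(len(str_i)):
--             if str_i[j] in btns:
--                 flag = False
--                 break
--         if flag:
--             res = min(res, abs(n - i) + len(str_i))
--     return res
-- ===== SOURCE B (Python) =====
-- def solve(n, btns):
--     # Constructive enumeration: build only the numbers whose digits are all
--     # pressable, length by length, instead of testing every i in 0..10**6.
--     allowed = [d for d in range(10) if str(d) not in btns]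
--     best = abs(n - 100)
--     nums = list(allowed)                      # valid numbers of length 1
--     for L in range(1, 6):
--         for v in nums:
--             best = min(best, abs(n - v) + L)
--         nums = [v * 10 + d for v in nums if v != 0 for d in allowed]
--     for v in nums:                            # valid numbers of length 6
--         best = min(best, abs(n - v) + 6)
--     if 1 in allowed and 0 in allowed:         # the single 7-digit channel 1000000
--         best = min(best, abs(n - 1000000) + 7)
--     return best
-- ===== Notes on version B (the rewrite author's own statement) =====
-- stated objective: faster
-- what changed: A tests every i in 0..10^6 by stringifying it and scanning its digits against the button list; B builds the set of pressable digits once and constructively enumerates, length by length (extending each valid number by one allowed digit), only the channel numbers that are actually reachable, handling the single 7-digit channel 1000000 separately.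
import Mathlib
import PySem

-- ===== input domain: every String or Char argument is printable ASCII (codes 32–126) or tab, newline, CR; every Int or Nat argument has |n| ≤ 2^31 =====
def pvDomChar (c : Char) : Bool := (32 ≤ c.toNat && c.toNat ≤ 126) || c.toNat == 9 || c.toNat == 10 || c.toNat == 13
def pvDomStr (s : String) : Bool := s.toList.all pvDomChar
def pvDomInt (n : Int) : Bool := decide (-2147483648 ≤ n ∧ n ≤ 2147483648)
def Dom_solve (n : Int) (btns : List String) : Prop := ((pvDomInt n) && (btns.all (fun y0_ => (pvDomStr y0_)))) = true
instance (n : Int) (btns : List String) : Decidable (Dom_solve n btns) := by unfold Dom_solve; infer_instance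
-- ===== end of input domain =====

-- B replaces A's scan of all 10^6+1 channel numbers (stringifying and digit-testing each) by a
-- constructive enumeration, length by length, of only the channels whose digits are all pressable.

-- ===== PORT A =====
-- A's inner loop 'for j in range(len(str_i)): if str_i[j] in btns: flag = False; break' is ported
-- as a fold over the characters of str(i) in order; the break only exits after flag is set False,
-- and False is absorbing in the fold, so the fold computes the same flag.
def solve (n : Int) (btns : List String) : Int :=
  (PySem.List.pyRange 0 1000001 1).foldl (fun res i =>
    let str_i := PySem.Int.toChars i
    let flag := str_i.foldl (fun flag c =>
      if String.ofList [c] ∈ btns then false else flag) true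
    if flag then min res (|n - i| + (str_i.length : Int)) else res)
    |n - 100|

-- ===== PORT B =====
-- B-side helpers: pvAllowed is Source B's 'allowed' comprehension, pvStep is the comprehension
-- [v * 10 + d for v in nums if v != 0 for d in allowed].
def pvAllowed (btns : List String) : List Int :=
  (PySem.List.pyRange 0 10 1).filter (fun d => !decide (PySem.Int.toStr d ∈ btns))

def pvStep (allowed ns : List Int) : List Int :=
  (ns.filter (fun v => v != 0)).flatMap (fun v => allowed.map (fun d => v * 10 + d))

def solve_alt (n : Int) (btns : List String) : Int :=
  let allowed := pvAllowed btns
  let s := (PySem.List.pyRange 1 6 1).foldl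
    (fun (s : Int × List Int) L =>
      (s.2.foldl (fun b v => min b (|n - v| + L)) s.1, pvStep allowed s.2))
    (|n - 100|, allowed)
  let best := s.2.foldl (fun b v => min b (|n - v| + 6)) s.1
  if (1 : Int) ∈ allowed ∧ (0 : Int) ∈ allowed then min best (|n - 1000000| + 7) else best

-- ===== PRECONDITION & SPEC =====
def Spec_solve (n : Int) (btns : List String) (out : Int) : Prop := out = solve_alt n btns
instance (n : Int) (btns : List String) (out : Int) : Decidable (Spec_solve n btns out) := by unfold Spec_solve; infer_instance

-- ===== CLAIM (what is proved, stated in full; the proofs are below) =====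
def Claim_equal_solve : Prop := ∀ (n : Int) (btns : List String), Dom_solve n btns → Spec_solve n btns (solve n btns)

-- ===== LEMMAS AND PROOFS =====

/-- The decimal digit characters of a natural number: str(m) for m ≥ 0. -/
def charsOf (m : Nat) : List Char :=
  if _h : m < 10 then [Nat.digitChar m]
  else charsOf (m / 10) ++ [Nat.digitChar (m % 10)]
decreasing_by exact Nat.div_lt_self (by omega) (by omega)

lemma charsOf_split (m : Nat) (h : ¬ m < 10) :
    charsOf m = charsOf (m / 10) ++ [Nat.digitChar (m % 10)] := by
  rw [charsOf]; simp [h]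

lemma toDigitsCore_eq_charsOf : ∀ (f m : Nat) (l : List Char), m < f →
    Nat.toDigitsCore 10 f m l = charsOf m ++ l := by
  intro f
  induction f with
  | zero => omega
  | succ f ih =>
    intro m l hm
    rw [Nat.toDigitsCore]
    by_cases h10 : m < 10
    · have : m / 10 = 0 := Nat.div_eq_of_lt h10
      simp [this, charsOf, h10, Nat.mod_eq_of_lt h10]
    · have hne : ¬ m / 10 = 0 := by
        have := Nat.div_pos (by omega : 10 ≤ m) (by omega : 0 < 10); omega
      simp only [hne]
      rw [ih (m / 10) _ (by
        have h1 : m / 10 < m := Nat.div_lt_self (by omega) (by omega)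
        omega)]
      rw [charsOf_split m h10, List.append_assoc]
      rfl

lemma toChars_nonneg (i : Int) (h : 0 ≤ i) : PySem.Int.toChars i = charsOf i.toNat := by
  rw [PySem.Int.toChars, if_neg (by omega), Nat.toDigits,
    toDigitsCore_eq_charsOf _ _ _ (Nat.lt_succ_self _), List.append_nil]

lemma flag_spec (btns : List String) (l : List Char) :
    (l.foldl (fun flag c => if String.ofList [c] ∈ btns then false else flag) true) = true
      ↔ ∀ c ∈ l, String.ofList [c] ∉ btns := by
  rw [show (fun (flag : Bool) (c : Char) => if String.ofList [c] ∈ btns then false else flag)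
      = (fun flag c => if (decide (String.ofList [c] ∈ btns)) = true then false else flag) from by
    funext flag c; by_cases h : String.ofList [c] ∈ btns <;> simp [h]]
  rw [PySem.List.foldl_if_false_eq (p := fun c => decide (String.ofList [c] ∈ btns))]
  simp

lemma charsOf_len_pos (m : Nat) : 1 ≤ (charsOf m).length := by
  rw [charsOf]; split <;> simp

lemma len_le_iff : ∀ (L : Nat), 1 ≤ L → ∀ m, (charsOf m).length ≤ L ↔ m < 10 ^ L := by
  intro L
  induction L with
  | zero => omega
  | succ L ih =>
    intro _ m
    by_cases h10 : m < 10
    · have h1 : (charsOf m).length = 1 := by rw [charsOf]; simp [h10]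
      have h2 : (10:Nat) ≤ 10 ^ (L+1) := Nat.le_self_pow (by omega) 10
      constructor
      · intro _; omega
      · intro _; omega
    · rw [charsOf_split m h10]
      simp only [List.length_append, List.length_singleton]
      by_cases hL : 1 ≤ L
      · rw [show (charsOf (m/10)).length + 1 ≤ L + 1 ↔ (charsOf (m/10)).length ≤ L by omega]
        rw [ih hL (m/10), Nat.div_lt_iff_lt_mul (by omega), pow_succ]
      · have hL0 : L = 0 := by omega
        subst hL0
        have := charsOf_len_pos (m/10)
        constructor
        · omega
        · intro h; omega

lemma toStr_small (d : Int) (h0 : 0 ≤ d) (h10 : d < 10) :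
    PySem.Int.toStr d = String.ofList [Nat.digitChar d.toNat] := by
  rw [PySem.Int.toStr, toChars_nonneg d h0]
  rw [charsOf, dif_pos (by omega)]

/-- digit validity: every digit character of m is a pressable button -/
def okN (btns : List String) (m : Nat) : Prop := ∀ c ∈ charsOf m, String.ofList [c] ∉ btns

def CharL (btns : List String) (L : Nat) (ns : List Int) : Prop :=
  ∀ v : Int, v ∈ ns ↔ 0 ≤ v ∧ (charsOf v.toNat).length = L ∧ okN btns v.toNat

lemma mem_pvAllowed (btns : List String) (d : Int) :
    d ∈ pvAllowed btns ↔ 0 ≤ d ∧ d < 10 ∧ PySem.Int.toStr d ∉ btns := by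
  simp only [pvAllowed, List.mem_filter, PySem.List.mem_pyRange_one, Bool.not_eq_eq_eq_not,
    Bool.not_true, decide_eq_false_iff_not]
  tauto

lemma charsOf_small (m : Nat) (h : m < 10) : charsOf m = [Nat.digitChar m] := by
  rw [charsOf, dif_pos h]

lemma len_eq_one_iff (m : Nat) : (charsOf m).length = 1 ↔ m < 10 := by
  constructor
  · intro h
    by_contra h10
    rw [charsOf_split m h10, List.length_append, List.length_singleton] at h
    have := charsOf_len_pos (m / 10)
    omega
  · intro h; rw [charsOf_small m h]; rfl

lemma charL_base (btns : List String) : CharL btns 1 (pvAllowed btns) := by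
  intro v
  rw [mem_pvAllowed]
  constructor
  · rintro ⟨h0, h10, hnb⟩
    refine ⟨h0, ?_, ?_⟩
    · rw [len_eq_one_iff]; omega
    · intro c hc
      rw [charsOf_small _ (by omega)] at hc
      simp at hc; subst hc
      rw [toStr_small v h0 h10] at hnb; exact hnb
  · rintro ⟨h0, hlen, hok⟩
    have h10 : v.toNat < 10 := (len_eq_one_iff _).1 hlen
    refine ⟨h0, by omega, ?_⟩
    rw [toStr_small v h0 (by omega)]
    exact hok _ (by rw [charsOf_small _ h10]; simp)

lemma charsOf_append_digit (v d : Nat) (hv : 1 ≤ v) (hd : d < 10) :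
    charsOf (v * 10 + d) = charsOf v ++ [Nat.digitChar d] := by
  rw [charsOf_split _ (by omega)]
  have h1 : (v * 10 + d) / 10 = v := by omega
  have h2 : (v * 10 + d) % 10 = d := by omega
  rw [h1, h2]

lemma charL_step (btns : List String) (L : Nat) (hL : 1 ≤ L) (ns : List Int)
    (h : CharL btns L ns) : CharL btns (L + 1) (pvStep (pvAllowed btns) ns) := by
  intro v'
  simp only [pvStep, List.mem_flatMap, List.mem_filter, List.mem_map, bne_iff_ne, ne_eq]
  constructor
  · rintro ⟨v, ⟨hvns, hv0⟩, d, hd, rfl⟩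
    rcases (h v).1 hvns with ⟨hv0', hlen, hok⟩
    rcases (mem_pvAllowed btns d).1 hd with ⟨hd0, hd10, hdnb⟩
    have hvt : 1 ≤ v.toNat := by omega
    have htn : (v * 10 + d).toNat = v.toNat * 10 + d.toNat := by omega
    have hch : charsOf ((v * 10 + d).toNat) = charsOf v.toNat ++ [Nat.digitChar d.toNat] := by
      rw [htn, charsOf_append_digit _ _ hvt (by omega)]
    refine ⟨by omega, ?_, ?_⟩
    · rw [hch]; simp [hlen]
    · intro c hc
      rw [hch] at hc
      rcases List.mem_append.1 hc with hc | hc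
      · exact hok _ hc
      · simp at hc; subst hc
        rw [← toStr_small d hd0 hd10]; exact hdnb
  · rintro ⟨h0, hlen, hok⟩
    have hm10 : ¬ v'.toNat < 10 := by
      intro hlt
      rw [charsOf_small _ hlt] at hlen
      simp at hlen; omega
    have hsplit := charsOf_split v'.toNat hm10
    refine ⟨((v'.toNat / 10 : Nat) : Int), ⟨?_, ?_⟩, ((v'.toNat % 10 : Nat) : Int), ?_, ?_⟩
    · rw [h]
      refine ⟨by positivity, ?_, ?_⟩
      · rw [Int.toNat_natCast]
        rw [hsplit] at hlen; simp at hlen; omega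
      · intro c hc
        exact hok c (by rw [hsplit, Int.toNat_natCast] at *; exact List.mem_append_left _ hc)
    · have : 1 ≤ v'.toNat / 10 := by omega
      omega
    · rw [mem_pvAllowed]
      refine ⟨by positivity, by exact_mod_cast Nat.mod_lt _ (by omega), ?_⟩
      rw [toStr_small _ (by positivity) (by exact_mod_cast Nat.mod_lt _ (by omega))]
      rw [Int.toNat_natCast]
      exact hok _ (by rw [hsplit]; simp)
    · omega

lemma charsOf_million : charsOf 1000000 = ['1','0','0','0','0','0','0'] := by
  have e : ∀ m : Nat, ¬ m < 10 → charsOf m = charsOf (m / 10) ++ [Nat.digitChar (m % 10)] := charsOf_split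
  rw [e 1000000 (by norm_num)]; norm_num
  rw [e 100000 (by norm_num)]; norm_num
  rw [e 10000 (by norm_num)]; norm_num
  rw [e 1000 (by norm_num)]; norm_num
  rw [e 100 (by norm_num)]; norm_num
  rw [e 10 (by norm_num)]; norm_num
  rw [charsOf_small 1 (by norm_num)]
  rfl

lemma ok7_iff (btns : List String) :
    okN btns 1000000 ↔ String.ofList ['1'] ∉ btns ∧ String.ofList ['0'] ∉ btns := by
  unfold okN
  rw [charsOf_million]
  constructor
  · intro h; exact ⟨h _ (by simp), h _ (by simp)⟩
  · rintro ⟨h1, h0⟩ c hc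
    simp at hc
    rcases hc with rfl | rfl
    · exact h1
    · exact h0

lemma memA (n : Int) (btns : List String) (c : Int) :
    c ∈ ((PySem.List.pyRange 0 1000001 1).filter
        (fun i => (PySem.Int.toChars i).foldl
          (fun flag c => if String.ofList [c] ∈ btns then false else flag) true)).map
        (fun i => |n - i| + ((PySem.Int.toChars i).length : Int))
      ↔ ∃ i : Int, (0 ≤ i ∧ i < 1000001) ∧ okN btns i.toNat
          ∧ c = |n - i| + ((charsOf i.toNat).length : Int) := by
  simp only [List.mem_map, List.mem_filter, PySem.List.mem_pyRange_one]
  constructor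
  · rintro ⟨i, ⟨⟨h0, hlt⟩, hflag⟩, rfl⟩
    have hok : okN btns i.toNat := by
      have := (flag_spec btns (PySem.Int.toChars i)).1 hflag
      rw [toChars_nonneg i h0] at this
      exact this
    exact ⟨i, ⟨h0, hlt⟩, hok, by rw [toChars_nonneg i h0]⟩
  · rintro ⟨i, ⟨h0, hlt⟩, hok, rfl⟩
    refine ⟨i, ⟨⟨h0, hlt⟩, ?_⟩, by rw [toChars_nonneg i h0]⟩
    rw [flag_spec, toChars_nonneg i h0]
    exact hok

lemma memB_mid (n : Int) (btns : List String) (c : Int) :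
    (c ∈ (pvAllowed btns).map (fun v => |n - v| + (1:Int))
      ∨ c ∈ (pvStep (pvAllowed btns) (pvAllowed btns)).map (fun v => |n - v| + (2:Int))
      ∨ c ∈ (pvStep (pvAllowed btns) (pvStep (pvAllowed btns) (pvAllowed btns))).map (fun v => |n - v| + (3:Int))
      ∨ c ∈ (pvStep (pvAllowed btns) (pvStep (pvAllowed btns) (pvStep (pvAllowed btns) (pvAllowed btns)))).map (fun v => |n - v| + (4:Int))
      ∨ c ∈ (pvStep (pvAllowed btns) (pvStep (pvAllowed btns) (pvStep (pvAllowed btns) (pvStep (pvAllowed btns) (pvAllowed btns))))).map (fun v => |n - v| + (5:Int))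
      ∨ c ∈ (pvStep (pvAllowed btns) (pvStep (pvAllowed btns) (pvStep (pvAllowed btns) (pvStep (pvAllowed btns) (pvStep (pvAllowed btns) (pvAllowed btns)))))).map (fun v => |n - v| + (6:Int)))
    ↔ ∃ i : Int, (0 ≤ i ∧ i < 1000000) ∧ okN btns i.toNat
        ∧ c = |n - i| + ((charsOf i.toNat).length : Int) := by
  have hc1 : CharL btns 1 (pvAllowed btns) := charL_base btns
  have hc2 := charL_step btns 1 (by omega) _ hc1
  have hc3 := charL_step btns 2 (by omega) _ hc2
  have hc4 := charL_step btns 3 (by omega) _ hc3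
  have hc5 := charL_step btns 4 (by omega) _ hc4
  have hc6 := charL_step btns 5 (by omega) _ hc5
  unfold CharL at hc1 hc2 hc3 hc4 hc5 hc6
  simp only [List.mem_map, hc1, hc2, hc3, hc4, hc5, hc6]
  constructor
  · rintro (⟨v,⟨h0,hlen,hok⟩,rfl⟩|⟨v,⟨h0,hlen,hok⟩,rfl⟩|⟨v,⟨h0,hlen,hok⟩,rfl⟩|⟨v,⟨h0,hlen,hok⟩,rfl⟩|⟨v,⟨h0,hlen,hok⟩,rfl⟩|⟨v,⟨h0,hlen,hok⟩,rfl⟩) <;>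
    · refine ⟨v, ⟨h0, ?_⟩, hok, by rw [hlen]; norm_num⟩
      have := (len_le_iff 6 (by omega) v.toNat).1 (by omega)
      have h10 : (10:Nat) ^ 6 = 1000000 := by norm_num
      omega
  · rintro ⟨i, ⟨h0, hlt⟩, hok, rfl⟩
    have h10 : (10:Nat) ^ 6 = 1000000 := by norm_num
    have hle : (charsOf i.toNat).length ≤ 6 := (len_le_iff 6 (by omega) _).2 (by omega)
    have hge : 1 ≤ (charsOf i.toNat).length := charsOf_len_pos _
    set K := (charsOf i.toNat).length with hK
    interval_cases K
    · exact Or.inl ⟨i, ⟨h0, hK.symm, hok⟩, by norm_num⟩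
    · exact Or.inr (Or.inl ⟨i, ⟨h0, hK.symm, hok⟩, by norm_num⟩)
    · exact Or.inr (Or.inr (Or.inl ⟨i, ⟨h0, hK.symm, hok⟩, by norm_num⟩))
    · exact Or.inr (Or.inr (Or.inr (Or.inl ⟨i, ⟨h0, hK.symm, hok⟩, by norm_num⟩)))
    · exact Or.inr (Or.inr (Or.inr (Or.inr (Or.inl ⟨i, ⟨h0, hK.symm, hok⟩, by norm_num⟩))))
    · exact Or.inr (Or.inr (Or.inr (Or.inr (Or.inr ⟨i, ⟨h0, hK.symm, hok⟩, by norm_num⟩))))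

lemma foldl_min_eq_of_mem_iff (a : Int) (xs ys : List Int) (h : ∀ c, c ∈ xs ↔ c ∈ ys) :
    xs.foldl min a = ys.foldl min a := by
  have aux : ∀ (xs ys : List Int), (∀ c ∈ ys, c ∈ xs) → xs.foldl min a ≤ ys.foldl min a := by
    intro xs ys hsub
    rcases PySem.List.foldl_min_mem ys a with hy | hy
    · rw [hy]; exact (PySem.List.foldl_min_le xs a).1
    · exact (PySem.List.foldl_min_le xs a).2 _ (hsub _ hy)
  exact le_antisymm (aux xs ys (fun c hc => (h c).2 hc)) (aux ys xs (fun c hc => (h c).1 hc))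

lemma toStr_one : PySem.Int.toStr 1 = String.ofList ['1'] := by
  rw [toStr_small 1 (by norm_num) (by norm_num)]; rfl

lemma toStr_zero : PySem.Int.toStr 0 = String.ofList ['0'] := by
  rw [toStr_small 0 (by norm_num) (by norm_num)]; rfl

lemma cond7_iff (btns : List String) :
    ((1 : Int) ∈ pvAllowed btns ∧ (0 : Int) ∈ pvAllowed btns) ↔ okN btns 1000000 := by
  rw [ok7_iff, mem_pvAllowed, mem_pvAllowed, toStr_one, toStr_zero]
  constructor
  · rintro ⟨⟨_, _, h1⟩, ⟨_, _, h0⟩⟩; exact ⟨h1, h0⟩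
  · rintro ⟨h1, h0⟩; exact ⟨⟨by norm_num, by norm_num, h1⟩, ⟨by norm_num, by norm_num, h0⟩⟩

lemma costA_million (n : Int) :
    |n - 1000000| + ((charsOf (1000000 : Int).toNat).length : Int) = |n - 1000000| + 7 := by
  have h : (1000000 : Int).toNat = 1000000 := rfl
  rw [h, charsOf_million]
  norm_num

set_option maxHeartbeats 1600000 in
lemma main (n : Int) (btns : List String) : solve n btns = solve_alt n btns := by
  have hrange : PySem.List.pyRange 1 6 1 = [1,2,3,4,5] := by decide
  simp only [solve, solve_alt, hrange, List.foldl_cons, List.foldl_nil]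
  rw [PySem.List.foldl_if_eq_foldl_filter
      (p := fun i => (PySem.Int.toChars i).foldl (fun flag c => if String.ofList [c] ∈ btns then false else flag) true)
      (f := fun res i => min res (|n - i| + ((PySem.Int.toChars i).length : Int)))]
  rw [← List.foldl_map (f := fun i => |n - i| + ((PySem.Int.toChars i).length : Int)) (g := min)]
  rw [← List.foldl_map (f := fun v => |n - v| + (1:Int)) (g := min)]
  rw [← List.foldl_map (f := fun v => |n - v| + (2:Int)) (g := min)]
  rw [← List.foldl_map (f := fun v => |n - v| + (3:Int)) (g := min)]
  rw [← List.foldl_map (f := fun v => |n - v| + (4:Int)) (g := min)]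
  rw [← List.foldl_map (f := fun v => |n - v| + (5:Int)) (g := min)]
  rw [← List.foldl_map (f := fun v => |n - v| + (6:Int)) (g := min)]
  rw [← List.foldl_append, ← List.foldl_append, ← List.foldl_append, ← List.foldl_append, ← List.foldl_append]
  by_cases hcond : (1 : Int) ∈ pvAllowed btns ∧ (0 : Int) ∈ pvAllowed btns
  · rw [if_pos hcond]
    rw [show ∀ a : Int, min a (|n - 1000000| + 7) = List.foldl min a [|n - 1000000| + 7] from fun _ => rfl]
    rw [← List.foldl_append]
    apply foldl_min_eq_of_mem_iff
    intro c
    rw [memA]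
    simp only [List.mem_append, List.mem_singleton]
    rw [memB_mid n btns c]
    constructor
    · rintro ⟨i, ⟨h0, hlt⟩, hok, rfl⟩
      by_cases h6 : i < 1000000
      · exact Or.inl ⟨i, ⟨h0, h6⟩, hok, rfl⟩
      · have hi : i = 1000000 := by omega
        subst hi
        exact Or.inr (costA_million n)
    · rintro (⟨i, ⟨h0, hlt⟩, hok, rfl⟩ | h)
      · exact ⟨i, ⟨h0, by omega⟩, hok, rfl⟩
      · exact ⟨1000000, ⟨by norm_num, by norm_num⟩, (cond7_iff btns).1 hcond,
          by rw [h, ← costA_million n]⟩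
  · rw [if_neg hcond]
    apply foldl_min_eq_of_mem_iff
    intro c
    rw [memA]
    simp only [List.mem_append]
    rw [memB_mid n btns c]
    constructor
    · rintro ⟨i, ⟨h0, hlt⟩, hok, rfl⟩
      have h6 : i < 1000000 := by
        by_contra h
        have hi : i = 1000000 := by omega
        subst hi
        exact hcond ((cond7_iff btns).2 (by simpa using hok))
      exact ⟨i, ⟨h0, h6⟩, hok, rfl⟩
    · rintro ⟨i, ⟨h0, hlt⟩, hok, rfl⟩
      exact ⟨i, ⟨h0, by omega⟩, hok, rfl⟩

-- ===== VERDICT (by name: the statement is the Claim_ definition above) =====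
theorem solve_spec : Claim_equal_solve := by
  intro n btns _
  unfold Spec_solve
  exact main n btns
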